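-- pv_equiv track=rewrite | github.com/SREENIVASAN-PRASANTH/CODING-PRACTICE | python DSA/reorder_the_string.py | get_word_chunks_and_numbers_list
-- ===== SOURCE A (Python) =====
-- def get_number_end_index(sentence, start_index):
--     end_index = len(sentence)
--     for j in range(start_index, len(sentence)):
--         if not sentence[j].isdigit():
--             end_index = j
--             break
--     return end_index
--
-- def get_word_chunks_and_numbers_list(sentence):
--     word_chunks_list, numbers_list = [], []
--     i = 0
--     while i < len(sentence):
--         number = ""
--         if sentence[i].isdigit():
--             start_index = i
--             end_index = get_number_end_index(sentence, start_index)
--             number = int(sentence[start_index:end_index])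
--             word_chunk = sentence[:start_index]
--             numbers_list.append(number)
--             word_chunks_list.append(word_chunk)
--             sentence = sentence[end_index:]
--             i = 0
--         else:
--             i += 1
--     word_chunks_list.append(sentence)
--     return word_chunks_list, numbers_list
-- ===== SOURCE B (Python) =====
-- def get_word_chunks_and_numbers_list(sentence):
--     word_chunks_list, numbers_list = [], []
--     text = []
--     i, n = 0, len(sentence)
--     while i < n:
--         if sentence[i].isdigit():
--             j = i
--             while j < n and sentence[j].isdigit():
--                 j += 1
--             word_chunks_list.append("".join(text))
--             text = []
--             numbers_list.append(int(sentence[i:j]))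
--             i = j
--         else:
--             text.append(sentence[i])
--             i += 1
--     word_chunks_list.append("".join(text))
--     return word_chunks_list, numbers_list
-- ===== Notes on version B (the rewrite author's own statement) =====
-- stated objective: alternative
-- what changed: A repeatedly cuts the sentence after each number and restarts scanning from index 0 (re-slicing and rescanning the remainder for every digit run); B does one left-to-right pass that accumulates the pending text chunk and consumes each digit run once, never re-slicing or rescanning.
import Mathlib
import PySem

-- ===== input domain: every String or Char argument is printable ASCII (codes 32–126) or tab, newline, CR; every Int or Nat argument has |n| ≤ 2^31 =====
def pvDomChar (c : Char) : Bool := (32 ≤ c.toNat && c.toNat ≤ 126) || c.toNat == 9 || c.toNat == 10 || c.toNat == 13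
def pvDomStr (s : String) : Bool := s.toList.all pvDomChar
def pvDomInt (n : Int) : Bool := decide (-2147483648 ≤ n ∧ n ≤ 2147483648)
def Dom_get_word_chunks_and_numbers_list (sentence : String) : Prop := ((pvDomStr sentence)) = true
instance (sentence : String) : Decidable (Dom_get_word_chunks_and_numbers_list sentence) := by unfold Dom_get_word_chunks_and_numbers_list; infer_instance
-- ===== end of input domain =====

-- B replaces A's cut-and-restart loop (re-slicing the sentence and rescanning from index 0 after
-- every number) by a single left-to-right pass that accumulates the current text chunk and consumes
-- each digit run once; objective: alternative.

-- ===== PORT A =====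
-- helper get_number_end_index: the for-j loop with break, as structural recursion on j
def pvGneiLoop (s : List Char) (j : Nat) : Nat :=
  if h : j < s.length then
    if ¬ PySem.Chars.isdigit s[j] then j else pvGneiLoop s (j + 1)
  else s.length
termination_by s.length - j

def get_number_end_index (s : List Char) (start : Nat) : Nat :=
  pvGneiLoop s start

-- termination helper for the main loop: when s[i] is a digit the found end index is past i
theorem pvGneiLoop_ge (s : List Char) (j : Nat) (hj : j ≤ s.length) : j ≤ pvGneiLoop s j := by
  fun_induction pvGneiLoop s j with
  | case1 => omega
  | case2 j h hd ih => have := ih (by omega); omega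
  | case3 => omega

theorem pvGnei_ge (s : List Char) (i : Nat) (h : i < s.length)
    (hd : PySem.Chars.isdigit s[i] = true) : i + 1 ≤ get_number_end_index s i := by
  unfold get_number_end_index
  rw [pvGneiLoop]
  simp only [h, dif_pos, hd]
  simpa using pvGneiLoop_ge s (i + 1) (by omega)

-- the while-loop of A: state (sentence, i, word_chunks_list, numbers_list); int() ported as
-- (PySem.Int.ofChars? _).getD 0 — the slice is a nonempty digit run, so int() never raises
def pvAGo (s : List Char) (i : Nat) (chunks : List String) (nums : List Int) :
    List String × List Int :=
  if h : i < s.length then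
    if hd : PySem.Chars.isdigit s[i] then
      let e := get_number_end_index s i
      let number := (PySem.Int.ofChars? (PySem.List.slice s (some (i : Int)) (some (e : Int)))).getD 0
      let word_chunk := String.ofList (PySem.List.slice s none (some (i : Int)))
      pvAGo (PySem.List.slice s (some (e : Int)) none) 0
        (chunks ++ [word_chunk]) (nums ++ [number])
    else
      pvAGo s (i + 1) chunks nums
  else
    (chunks ++ [String.ofList s], nums)
termination_by 2 * s.length - i
decreasing_by
  · have he := pvGnei_ge s i h hd
    rw [PySem.List.slice_from_natCast]
    simp only [List.length_drop]
    omega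
  · omega

def get_word_chunks_and_numbers_list (sentence : String) : List String × List Int :=
  pvAGo sentence.toList 0 [] []

-- ===== PORT B =====
-- B's single pass: text is the pending chunk, a digit run is taken and dropped in one step
def pvBGo (cs : List Char) (text : List Char) (chunks : List String) (nums : List Int) :
    List String × List Int :=
  match cs with
  | [] => (chunks ++ [String.ofList text], nums)
  | c :: rest =>
    if PySem.Chars.isdigit c then
      let run := List.takeWhile PySem.Chars.isdigit (c :: rest)
      let rest' := List.dropWhile PySem.Chars.isdigit (c :: rest)
      pvBGo rest' [] (chunks ++ [String.ofList text])
        (nums ++ [(PySem.Int.ofChars? run).getD 0])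
    else
      pvBGo rest (text ++ [c]) chunks nums
termination_by cs.length
decreasing_by
  · rename_i hcd
    simp only [List.dropWhile, hcd]
    have := List.length_dropWhile_le PySem.Chars.isdigit rest
    simp only [List.length_cons]; omega
  · simp

def get_word_chunks_and_numbers_list_alt (sentence : String) : List String × List Int :=
  pvBGo sentence.toList [] [] []

-- ===== PRECONDITION & SPEC =====
def Spec_get_word_chunks_and_numbers_list (sentence : String) (out : List String × List Int) : Prop := out = get_word_chunks_and_numbers_list_alt sentence
instance (sentence : String) (out : List String × List Int) : Decidable (Spec_get_word_chunks_and_numbers_list sentence out) := by unfold Spec_get_word_chunks_and_numbers_list; infer_instance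

-- ===== CLAIM (what is proved, stated in full; the proofs are below) =====
def Claim_equal_get_word_chunks_and_numbers_list : Prop := ∀ (sentence : String), Dom_get_word_chunks_and_numbers_list sentence → Spec_get_word_chunks_and_numbers_list sentence (get_word_chunks_and_numbers_list sentence)

-- ===== LEMMAS AND PROOFS =====

-- get_number_end_index finds the end of the digit run starting at j
theorem pvGneiLoop_eq (s : List Char) (j : Nat) (hj : j ≤ s.length) :
    pvGneiLoop s j = j + ((s.drop j).takeWhile PySem.Chars.isdigit).length := by
  fun_induction pvGneiLoop s j with
  | case1 j h hnd =>
    rw [List.drop_eq_getElem_cons h, List.takeWhile]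
    simp [hnd]
  | case2 j h hd ih =>
    rw [List.drop_eq_getElem_cons h, List.takeWhile]
    simp only [Bool.not_eq_true] at hd
    rw [ih (by omega)]
    simp [hd]
    omega
  | case3 j h =>
    have : j = s.length := by omega
    subst this
    simp

-- main invariant: A's state (s, i) with the first i chars known non-digit corresponds to
-- B's state (remaining input s.drop i, pending text s.take i)
theorem pvAGo_eq_pvBGo (s : List Char) (i : Nat) (chunks : List String) (nums : List Int)
    (hle : i ≤ s.length) (hnd : ∀ c ∈ s.take i, ¬ PySem.Chars.isdigit c) :
    pvAGo s i chunks nums = pvBGo (s.drop i) (s.take i) chunks nums := by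
  fun_induction pvAGo s i chunks nums with
  | case1 s i chunks nums h hd e number word_chunk ih =>
    -- digit found at i
    have he1 : i + 1 ≤ e := pvGnei_ge s i h hd
    set tw := (s.drop i).takeWhile PySem.Chars.isdigit with htw
    set dw := (s.drop i).dropWhile PySem.Chars.isdigit with hdw
    have hsplit : tw ++ dw = s.drop i := List.takeWhile_append_dropWhile
    have heq : e = i + tw.length := by
      simpa [get_number_end_index, ← htw] using pvGneiLoop_eq s i (by omega)
    -- the three slices of A, in B's vocabulary
    have hs1 : PySem.List.slice s (some (i : Int)) (some (e : Int)) = tw := by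
      rw [show (e : Int) = (i : Int) + (tw.length : Int) by omega]
      rw [PySem.List.slice_natCast_add, ← hsplit]
      exact List.take_left
    have hs2 : PySem.List.slice s none (some (i : Int)) = s.take i :=
      PySem.List.slice_to_natCast ..
    have hs3 : PySem.List.slice s (some (e : Int)) none = dw := by
      rw [PySem.List.slice_from_natCast, heq, ← List.drop_drop, ← hsplit]
      exact List.drop_left
    conv_rhs => rw [List.drop_eq_getElem_cons h]
    rw [pvBGo]
    simp only [hd, ← List.drop_eq_getElem_cons h]
    rw [ih (by simp) (by simp)]
    simp only [List.drop_zero, List.take_zero]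
    simp only [e, number, word_chunk]
    rw [hs1, hs2, hs3, htw, hdw]
    simp only [if_true]
  | case2 s i chunks nums h hd ih =>
    -- non-digit at i: advance
    rw [ih (by omega) (by
      intro c hc
      rw [List.take_succ_eq_append_getElem h] at hc
      rcases List.mem_append.mp hc with h1 | h1
      · exact hnd c h1
      · simp only [List.mem_singleton] at h1; subst h1; simpa using hd)]
    rw [List.drop_eq_getElem_cons h, pvBGo]
    simp only [Bool.not_eq_true] at hd
    rw [List.take_succ_eq_append_getElem h]
    simp [hd]
  | case3 s i chunks nums h =>
    have : i = s.length := by omega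
    subst this
    rw [List.drop_length, List.take_length, pvBGo]

-- ===== VERDICT (by name: the statement is the Claim_ definition above) =====
theorem get_word_chunks_and_numbers_list_spec : Claim_equal_get_word_chunks_and_numbers_list := by
  intro sentence _
  unfold Spec_get_word_chunks_and_numbers_list get_word_chunks_and_numbers_list get_word_chunks_and_numbers_list_alt
  simpa using pvAGo_eq_pvBGo sentence.toList 0 [] [] (by omega) (by simp)
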